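-- pv_equiv track=rewrite | github.com/brochure/Stock-Complex-Networks | Codes/sampling_granger.py | IsPairSeriesCross
-- ===== SOURCE A (Python) =====
-- def IsPairSeriesCross(GCTestResPair):
--     flag_corss = False
--     state = False
--     if GCTestResPair[0][0] > GCTestResPair[0][1]:
--         state = True
--     for p in GCTestResPair[1:]:
--         if p[0] > p[1]:
--             if not state:
--                 flag_corss = True
--         else:
--             if state:
--                 flag_corss = True
--     return flag_corss
-- ===== SOURCE B (Python) =====
-- def IsPairSeriesCross(GCTestResPair):
--     comps = [p[0] > p[1] for p in GCTestResPair]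
--     return any(comps) and not all(comps)
-- ===== Notes on version B (the rewrite author's own statement) =====
-- stated objective: simpler
-- what changed: Replaces A's first-element seeding and flag/state branch logic by mapping each pair to its comparison outcome and returning any(comps) and not all(comps): a crossing exists iff both outcomes occur; B needs no reference to the first pair at all.
-- outside the precondition, e.g. on IsPairSeriesCross([]): A raises IndexError, B returns False
import Mathlib
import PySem

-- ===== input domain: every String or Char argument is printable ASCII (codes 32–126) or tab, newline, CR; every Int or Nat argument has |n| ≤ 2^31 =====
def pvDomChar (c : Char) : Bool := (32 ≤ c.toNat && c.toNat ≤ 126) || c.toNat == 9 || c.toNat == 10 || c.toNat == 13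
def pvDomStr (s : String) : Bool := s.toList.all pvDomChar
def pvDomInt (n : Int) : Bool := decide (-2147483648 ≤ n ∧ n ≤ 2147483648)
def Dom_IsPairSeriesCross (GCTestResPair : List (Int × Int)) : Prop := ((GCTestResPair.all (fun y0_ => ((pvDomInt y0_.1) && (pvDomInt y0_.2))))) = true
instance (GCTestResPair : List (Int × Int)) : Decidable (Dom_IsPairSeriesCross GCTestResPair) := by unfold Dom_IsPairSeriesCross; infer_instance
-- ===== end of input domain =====

-- B drops A's first-element seeding and flag/state branching: it maps each pair to its
-- comparison outcome and returns any(comps) and not all(comps) (simpler).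

-- ===== PORT A =====
def IsPairSeriesCross (GCTestResPair : List (Int × Int)) : Bool :=
  match PySem.List.pyGet? GCTestResPair 0 with
  | none => false  -- IndexError on empty input; excluded by Pre_
  | some p0 =>
    let state : Bool := decide (p0.1 > p0.2)
    (PySem.List.slice GCTestResPair (some 1) none).foldl
      (fun flag_corss p =>
        if p.1 > p.2 then (if !state then true else flag_corss)
        else (if state then true else flag_corss))
      false

-- ===== PORT B =====
def IsPairSeriesCross_alt (GCTestResPair : List (Int × Int)) : Bool :=
  let comps := GCTestResPair.map (fun p => decide (p.1 > p.2))
  comps.any id && !(comps.all id)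

-- ===== PRECONDITION & SPEC =====
-- Pre_: A indexes GCTestResPair[0], raising IndexError on the empty list.
def Pre_IsPairSeriesCross (GCTestResPair : List (Int × Int)) : Prop := GCTestResPair ≠ []
instance (GCTestResPair : List (Int × Int)) : Decidable (Pre_IsPairSeriesCross GCTestResPair) := by unfold Pre_IsPairSeriesCross; infer_instance
def pvWitness_IsPairSeriesCross : (List (Int × Int)) := [(1, 0), (0, 1)]

def Spec_IsPairSeriesCross (GCTestResPair : List (Int × Int)) (out : Bool) : Prop := out = IsPairSeriesCross_alt GCTestResPair
instance (GCTestResPair : List (Int × Int)) (out : Bool) : Decidable (Spec_IsPairSeriesCross GCTestResPair out) := by unfold Spec_IsPairSeriesCross; infer_instance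

-- ===== CLAIM (what is proved, stated in full; the proofs are below) =====
def Claim_equal_IsPairSeriesCross : Prop := ∀ (GCTestResPair : List (Int × Int)), Dom_IsPairSeriesCross GCTestResPair → Pre_IsPairSeriesCross GCTestResPair → Spec_IsPairSeriesCross GCTestResPair (IsPairSeriesCross GCTestResPair)

-- ===== LEMMAS AND PROOFS =====

-- A's loop: the flag accumulates whether some pair's comparison differs from the first's.
theorem pvA_loop (s0 : Bool) (t : List (Int × Int)) (f : Bool) :
    t.foldl (fun flag p =>
        if p.1 > p.2 then (if !s0 then true else flag)
        else (if s0 then true else flag)) f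
      = (f || t.any (fun p => decide (p.1 > p.2) != s0)) := by
  induction t generalizing f with
  | nil => simp
  | cons p t ih =>
    simp only [List.foldl_cons, List.any_cons, ih]
    by_cases h : p.1 > p.2 <;> cases s0 <;> simp [h]

-- Bridging the "differs from the first outcome" test to any/all over the mapped outcomes.
theorem pvAnyNeTrue {α : Type} (f : α → Bool) (t : List α) :
    (t.any fun p => !f p) = !t.all f := by
  induction t with
  | nil => simp
  | cons p t ih => cases h : f p <;> simp [h, ih]

-- ===== VERDICT (by name: the statement is the Claim_ definition above) =====
theorem IsPairSeriesCross_spec : Claim_equal_IsPairSeriesCross := by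
  intro xs _ hpre
  cases xs with
  | nil => exact absurd rfl hpre
  | cons p0 t =>
    unfold Spec_IsPairSeriesCross IsPairSeriesCross IsPairSeriesCross_alt
    have hget : PySem.List.pyGet? (p0 :: t) (0 : Int) = some p0 := by
      simp [PySem.List.pyGet?, PySem.List.pyIdx?]
    rw [hget]
    simp only [PySem.List.slice_from_one, List.tail_cons, pvA_loop, Bool.false_or,
      List.map_cons, List.any_cons, List.all_cons, id]
    cases h0 : decide (p0.1 > p0.2) <;>
      simp [pvAnyNeTrue]
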